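-- pv_equiv track=rewrite | github.com/TomaszGryczka/dataProtection | lab02/zad3.py | arc4_decode
-- ===== SOURCE A (Python) =====
-- def prepare_permutation(key):
--     d = len(key)
--     S = [0] * 256
--
--     for i in range(256):
--         S[i] = i
--
--     j = 0
--     for i in range(256):
--         j = (j + S[i] + ord(key[i % d])) % 256
--         S[j], S[i] = S[i], S[j]
--
--     return S
--
-- def arc4_decode(key, data):
--     splittedData = data.split()
--     decoded_data = ""
--     data_size_in_bytes = len(splittedData)
--
--     S = prepare_permutation(key)
--
--     i = 0
--     j = 0
--     m = 0
--     while m < data_size_in_bytes: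
--         i = (i + 1) % 256
--         j = (j + S[i]) % 256
--         S[j], S[i] = S[i], S[j]
--         encoding_byte = S[(S[i] + S[j]) % 256]
--         decoded_data += str(chr(int(splittedData[m], 16) ^ encoding_byte))
--         m = m + 1
--
--     return decoded_data
-- ===== SOURCE B (Python) =====
-- def arc4_decode(key, data):
--     tokens = data.split()
--     n = len(tokens)
--     # KSA driven by the key pre-extended (repeated and cut) to exactly 256 bytes,
--     # so the schedule loop consumes key bytes directly instead of indexing modulo len(key)
--     kb = [ord(c) for c in key]
--     ks = (kb * (256 // len(kb) + 1))[:256]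
--     S = list(range(256))
--     i = 0
--     j = 0
--     for k in ks:
--         j = (j + S[i] + k) % 256
--         S[i], S[j] = S[j], S[i]
--         i += 1
--     # PRGA run a full 256-byte page at a time (i makes one whole cycle 1..255,0 per
--     # page), deliberately overgenerating keystream past the message end
--     pages = []
--     j = 0
--     for _ in range((n + 255) // 256):
--         page = []
--         for i in range(1, 257):
--             i %= 256
--             j = (j + S[i]) % 256
--             S[i], S[j] = S[j], S[i]
--             page.append(S[(S[i] + S[j]) % 256])
--         pages.append(page)
--     # truncate the pooled keystream to the message length, then XOR it in
--     stream = [b for page in pages for b in page][:n]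
--     return ''.join(chr(int(t, 16) ^ b) for t, b in zip(tokens, stream))
-- ===== Notes on version B (the rewrite author's own statement) =====
-- stated objective: alternative
-- what changed: B pre-extends the key to a flat 256-byte schedule consumed linearly by the KSA (no modular key indexing), and replaces A's per-token PRGA stepping by page-based keystream generation: fixed 256-step cycles each emit a whole 256-byte page (overgenerating past the message end), the pooled pages are truncated to the message length, and a separate pass XORs them into the parsed tokens.
import Mathlib
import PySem

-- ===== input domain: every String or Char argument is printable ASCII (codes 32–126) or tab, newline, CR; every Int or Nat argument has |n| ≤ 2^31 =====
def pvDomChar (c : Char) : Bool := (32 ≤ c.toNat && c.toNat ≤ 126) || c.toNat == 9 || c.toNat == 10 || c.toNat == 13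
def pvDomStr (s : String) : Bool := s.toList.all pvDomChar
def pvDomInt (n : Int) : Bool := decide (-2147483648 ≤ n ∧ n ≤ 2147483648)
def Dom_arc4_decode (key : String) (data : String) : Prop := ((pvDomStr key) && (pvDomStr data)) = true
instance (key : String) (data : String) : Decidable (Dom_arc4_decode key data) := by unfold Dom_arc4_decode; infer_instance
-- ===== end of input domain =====

-- B restructures the RC4 decode: the KSA consumes a key pre-extended to a flat 256-byte schedule
-- (no modular key indexing) and the keystream is produced a fixed 256-byte page per full i-cycle,
-- overgenerated past the message, pooled, truncated and XORed in a separate pass; objective: alternative.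

-- ===== PORT A =====

-- Python tuple swap `S[j], S[i] = S[i], S[j]` (RHS read from the original S).
def pvSwapA (S : List Nat) (i j : Nat) : List Nat := (S.set j (S.getD i 0)).set i (S.getD j 0)

-- int(t, 16) then ^ k then chr(...); Pre_ guarantees the parse succeeds and chr's argument is a
-- valid non-surrogate code point, so getD/toNat/Char.ofNat defaults are never reached inside Pre_.
def pvDecodeByte (t : String) (k : Nat) : Char :=
  Char.ofNat (((PySem.Int.ofStrBase? t 16).getD 0).toNat ^^^ k)

def prepare_permutation (key : String) : List Nat :=
  let d := key.toList.length
  let S0 := (List.range 256).foldl (fun (S : List Nat) i => S.set i i) (List.replicate 256 0)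
  ((List.range 256).foldl
    (fun (st : Nat × List Nat) i =>
      let j := (st.1 + st.2.getD i 0 + (key.toList.getD (i % d) ' ').toNat) % 256
      (j, pvSwapA st.2 i j))
    (0, S0)).2

-- the while loop over m, as structural recursion on the remaining tokens
def pvLoopA : List String → Nat → Nat → List Nat → String → String
  | [], _, _, _, acc => acc
  | t :: ts, i, j, S, acc =>
    let i' := (i + 1) % 256
    let j' := (j + S.getD i' 0) % 256
    let S' := pvSwapA S i' j'
    let eb := S'.getD ((S'.getD i' 0 + S'.getD j' 0) % 256) 0
    pvLoopA ts i' j' S' (acc.push (pvDecodeByte t eb))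

def arc4_decode (key : String) (data : String) : String :=
  pvLoopA (PySem.Str.split₀ data) 0 0 (prepare_permutation key) ""

-- ===== PORT B =====

-- Python tuple swap `S[i], S[j] = S[j], S[i]` (Source B's order; RHS read from the original S).
def pvSwapB (S : List Nat) (i j : Nat) : List Nat := (S.set i (S.getD j 0)).set j (S.getD i 0)

-- `kb * m` (list repetition) is ported as (List.replicate m kb).flatten, `[:256]` as take 256,
-- `(n + 255) // 256` on these nonnegative ints as Nat division (exact there); ''.join of the
-- generator of one-char strings chr(...) is ported as String.ofList of the mapped chars (exact).
def arc4_decode_alt (key : String) (data : String) : String :=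
  let tokens := PySem.Str.split₀ data
  let n := tokens.length
  let kb := key.toList.map Char.toNat
  let ks := ((List.replicate (256 / kb.length + 1) kb).flatten).take 256
  let ksa := ks.foldl
    (fun (st : Nat × Nat × List Nat) k =>
      let j := (st.2.1 + st.2.2.getD st.1 0 + k) % 256
      (st.1 + 1, j, pvSwapB st.2.2 st.1 j))
    (0, 0, List.range 256)
  let pages := (List.range ((n + 255) / 256)).foldl
    (fun (st : Nat × List Nat × List (List Nat)) _ =>
      let r := (PySem.List.pyRange 1 257 1).foldl
        (fun (q : Nat × List Nat × List Nat) iv =>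
          let i := (PySem.Int.mod iv 256).toNat
          let j := (q.1 + q.2.1.getD i 0) % 256
          let S := pvSwapB q.2.1 i j
          (j, S, q.2.2 ++ [S.getD ((S.getD i 0 + S.getD j 0) % 256) 0]))
        (st.1, st.2.1, [])
      (r.1, r.2.1, st.2.2 ++ [r.2.2]))
    (0, ksa.2.2, [])
  let stream := pages.2.2.flatten.take n
  String.ofList ((tokens.zip stream).map fun p => pvDecodeByte p.1 p.2)

-- ===== PRECONDITION & SPEC =====
-- Pre_ excludes the inputs on which A raises — empty key (ZeroDivisionError in `i % d`) and tokens
-- that int(t,16) rejects or whose decoded code point chr would reject (ValueError) — and, although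
-- A returns there, tokens whose parsed value lies in the surrogate range 0xD800–0xDFFF: A then
-- returns a lone-surrogate str that no Lean String can represent.
def pvTokOK (t : String) : Bool :=
  match PySem.Int.ofStrBase? t 16 with
  | some v => decide (0 ≤ v ∧ v ≤ 1114111 ∧ ¬(55296 ≤ v ∧ v ≤ 57343))
  | none => false
def Pre_arc4_decode (key : String) (data : String) : Prop :=
  key.toList ≠ [] ∧ ∀ t ∈ PySem.Str.split₀ data, pvTokOK t = true
instance (key : String) (data : String) : Decidable (Pre_arc4_decode key data) := by
  unfold Pre_arc4_decode; infer_instance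
def pvWitness_arc4_decode : String × String := ("Key", "1f 0x2A e3")
def Spec_arc4_decode (key : String) (data : String) (out : String) : Prop := out = arc4_decode_alt key data
instance (key : String) (data : String) (out : String) : Decidable (Spec_arc4_decode key data out) := by unfold Spec_arc4_decode; infer_instance

-- ===== CLAIM (what is proved, stated in full; the proofs are below) =====
def Claim_equal_arc4_decode : Prop := ∀ (key : String) (data : String), Dom_arc4_decode key data → Pre_arc4_decode key data → Spec_arc4_decode key data (arc4_decode key data)

-- ===== LEMMAS AND PROOFS =====

-- the two Python tuple-swaps write the same list
theorem pvSwap_eq (S : List Nat) (i j : Nat) : pvSwapA S i j = pvSwapB S i j := by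
  unfold pvSwapA pvSwapB
  by_cases h : i = j
  · subst h; simp
  · rw [List.set_comm _ _ h]

set_option maxRecDepth 4096 in
theorem pvInit_eq :
    (List.range 256).foldl (fun (S : List Nat) i => S.set i i) (List.replicate 256 0)
      = List.range 256 := by decide

-- reading the flattened replicated key is reading the key modulo its length
theorem pvFlatRep_getD (l : List Nat) :
    ∀ (n k : Nat), k < n * l.length →
      ((List.replicate n l).flatten).getD k 0 = l.getD (k % l.length) 0 := by
  intro n
  induction n with
  | zero => intro k hk; omega
  | succ n ih =>
    intro k hk
    rw [List.replicate_succ, List.flatten_cons]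
    by_cases h : k < l.length
    · rw [List.getD_append _ _ _ _ h, Nat.mod_eq_of_lt h]
    · have hlen : l.length ≤ k := by omega
      rw [List.getD_append_right _ _ _ _ hlen, ih]
      · congr 1
        conv_rhs => rw [← Nat.sub_add_cancel hlen]
        rw [Nat.add_mod_right]
      · have h2 : (n + 1) * l.length = n * l.length + l.length := by ring
        omega

theorem pvGetD_map_toNat (l : List Char) (m : Nat) (h : m < l.length) :
    (l.map Char.toNat).getD m 0 = (l.getD m ' ').toNat := by
  rw [List.getD_eq_getElem _ _ (by simpa), List.getD_eq_getElem _ _ h, List.getElem_map]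

-- B's counter-carrying KSA fold equals a range' fold reading F at each position
theorem pvKSA_counter (F : Nat → Nat) :
    ∀ (l : List Nat) (i j : Nat) (S : List Nat),
      (∀ k, k < l.length → l.getD k 0 = F (i + k)) →
      l.foldl
        (fun (st : Nat × Nat × List Nat) k =>
          let j := (st.2.1 + st.2.2.getD st.1 0 + k) % 256
          (st.1 + 1, j, pvSwapB st.2.2 st.1 j))
        (i, j, S)
      = (i + l.length,
         (List.range' i l.length).foldl
           (fun (st : Nat × List Nat) x =>
             let j := (st.1 + st.2.getD x 0 + F x) % 256
             (j, pvSwapA st.2 x j))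
           (j, S)) := by
  intro l
  induction l with
  | nil => intro i j S _; simp
  | cons a l ih =>
    intro i j S hF
    have h0 : a = F i := by simpa using hF 0 (by simp)
    have htail : ∀ k, k < l.length → l.getD k 0 = F ((i + 1) + k) := fun k hk => by
      simpa [Nat.add_assoc, Nat.add_comm 1 k] using hF (k + 1) (by simp; omega)
    simp only [List.foldl_cons, List.length_cons, List.range'_succ]
    rw [ih (i + 1) _ _ htail, ← h0, pvSwap_eq S i]
    simp only [Prod.mk.injEq]
    refine ⟨by omega, by dsimp only⟩

-- the PRGA as a step-counted run: final i, final j, final S, keystream emitted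
def pvRun : Nat → Nat → Nat → List Nat → Nat × Nat × List Nat × List Nat
  | 0, i, j, S => (i, j, S, [])
  | s+1, i, j, S =>
    let i' := (i + 1) % 256
    let j' := (j + S.getD i' 0) % 256
    let S' := pvSwapA S i' j'
    let r := pvRun s i' j' S'
    (r.1, r.2.1, r.2.2.1, S'.getD ((S'.getD i' 0 + S'.getD j' 0) % 256) 0 :: r.2.2.2)

-- A's interleaved loop = decode the tokens against the run's keystream
theorem pvLoopA_run (ts : List String) : ∀ (i j : Nat) (S : List Nat) (acc : String),
    pvLoopA ts i j S acc
      = acc ++ String.ofList ((ts.zip (pvRun ts.length i j S).2.2.2).map fun p => pvDecodeByte p.1 p.2) := by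
  induction ts with
  | nil => intro i j S acc; rw [← String.toList_inj]; simp [pvLoopA, pvRun]
  | cons t ts ih =>
    intro i j S acc
    simp only [pvLoopA, List.length_cons, pvRun, List.zip_cons_cons, List.map_cons]
    rw [ih, ← String.toList_inj]
    simp

theorem pvRun_fst : ∀ (s i j : Nat) (S : List Nat), i < 256 → (pvRun s i j S).1 = (i + s) % 256 := by
  intro s
  induction s with
  | zero => intro i j S h; simp [pvRun]; omega
  | succ s ih =>
    intro i j S h
    simp only [pvRun]
    rw [ih _ _ _ (Nat.mod_lt _ (by omega))]
    omega

theorem pvRun_add : ∀ (a b i j : Nat) (S : List Nat),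
    pvRun (a + b) i j S
      = ((pvRun b (pvRun a i j S).1 (pvRun a i j S).2.1 (pvRun a i j S).2.2.1).1,
         (pvRun b (pvRun a i j S).1 (pvRun a i j S).2.1 (pvRun a i j S).2.2.1).2.1,
         (pvRun b (pvRun a i j S).1 (pvRun a i j S).2.1 (pvRun a i j S).2.2.1).2.2.1,
         (pvRun a i j S).2.2.2 ++ (pvRun b (pvRun a i j S).1 (pvRun a i j S).2.1 (pvRun a i j S).2.2.1).2.2.2) := by
  intro a
  induction a with
  | zero => intro b i j S; simp [pvRun]
  | succ a ih =>
    intro b i j S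
    rw [Nat.succ_add]
    simp only [pvRun]
    rw [ih]
    simp

theorem pvRun_take : ∀ (n s : Nat), n ≤ s → ∀ (i j : Nat) (S : List Nat),
    ((pvRun s i j S).2.2.2).take n = (pvRun n i j S).2.2.2 := by
  intro n
  induction n with
  | zero => intro s _ i j S; simp [pvRun]
  | succ n ih =>
    intro s hs i j S
    obtain ⟨s', rfl⟩ : ∃ s', s = s' + 1 := ⟨s - 1, by omega⟩
    simp only [pvRun, List.take_succ_cons]
    rw [ih _ (by omega)]

-- one inner page loop, started with i0 steps of the cycle already behind it, is the run of the rest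
theorem pvPage : ∀ (m i0 : Nat), i0 + m = 256 → ∀ (j : Nat) (S acc : List Nat),
    (PySem.List.pyRange ((i0 : Int) + 1) 257 1).foldl
      (fun (q : Nat × List Nat × List Nat) iv =>
        let i := (PySem.Int.mod iv 256).toNat
        let j := (q.1 + q.2.1.getD i 0) % 256
        let S := pvSwapB q.2.1 i j
        (j, S, q.2.2 ++ [S.getD ((S.getD i 0 + S.getD j 0) % 256) 0]))
      (j, S, acc)
    = ((pvRun m i0 j S).2.1, (pvRun m i0 j S).2.2.1, acc ++ (pvRun m i0 j S).2.2.2) := by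
  intro m
  induction m with
  | zero =>
    intro i0 h j S acc
    have : i0 = 256 := by omega
    subst this
    rw [PySem.List.pyRange_one_eq_nil (by norm_num)]
    simp [pvRun]
  | succ m ih =>
    intro i0 h j S acc
    rw [PySem.List.pyRange_one_cons (by
      have : i0 ≤ 255 := by omega
      omega)]
    rw [List.foldl_cons]
    simp only
    have hmod : (PySem.Int.mod ((i0 : Int) + 1) 256).toNat = (i0 + 1) % 256 := by
      rw [PySem.Int.mod_eq_emod_of_pos (by norm_num)]
      omega
    simp only [pvRun, hmod, pvSwap_eq]
    rcases Nat.eq_zero_or_pos m with hm | hm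
    · subst hm
      rw [PySem.List.pyRange_one_eq_nil (by omega)]
      simp [pvRun]
    · have hi' : (i0 + 1) % 256 = i0 + 1 := Nat.mod_eq_of_lt (by omega)
      rw [hi']
      have := ih (i0 + 1) (by omega)
      rw [show (i0 : Int) + 1 + 1 = ((i0 + 1 : Nat) : Int) + 1 by push_cast; ring, this]
      simp

-- the outer page loop pools exactly the run of pc·256 keystream steps
theorem pvOuter : ∀ (pc : Nat) (j : Nat) (S : List Nat) (A : List (List Nat)),
    ((List.range pc).foldl
      (fun (st : Nat × List Nat × List (List Nat)) _ =>
        let r := (PySem.List.pyRange 1 257 1).foldl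
          (fun (q : Nat × List Nat × List Nat) iv =>
            let i := (PySem.Int.mod iv 256).toNat
            let j := (q.1 + q.2.1.getD i 0) % 256
            let S := pvSwapB q.2.1 i j
            (j, S, q.2.2 ++ [S.getD ((S.getD i 0 + S.getD j 0) % 256) 0]))
          (st.1, st.2.1, [])
        (r.1, r.2.1, st.2.2 ++ [r.2.2]))
      (j, S, A)).1 = (pvRun (pc * 256) 0 j S).2.1
  ∧ ((List.range pc).foldl
      (fun (st : Nat × List Nat × List (List Nat)) _ =>
        let r := (PySem.List.pyRange 1 257 1).foldl
          (fun (q : Nat × List Nat × List Nat) iv =>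
            let i := (PySem.Int.mod iv 256).toNat
            let j := (q.1 + q.2.1.getD i 0) % 256
            let S := pvSwapB q.2.1 i j
            (j, S, q.2.2 ++ [S.getD ((S.getD i 0 + S.getD j 0) % 256) 0]))
          (st.1, st.2.1, [])
        (r.1, r.2.1, st.2.2 ++ [r.2.2]))
      (j, S, A)).2.1 = (pvRun (pc * 256) 0 j S).2.2.1
  ∧ ((List.range pc).foldl
      (fun (st : Nat × List Nat × List (List Nat)) _ =>
        let r := (PySem.List.pyRange 1 257 1).foldl
          (fun (q : Nat × List Nat × List Nat) iv =>
            let i := (PySem.Int.mod iv 256).toNat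
            let j := (q.1 + q.2.1.getD i 0) % 256
            let S := pvSwapB q.2.1 i j
            (j, S, q.2.2 ++ [S.getD ((S.getD i 0 + S.getD j 0) % 256) 0]))
          (st.1, st.2.1, [])
        (r.1, r.2.1, st.2.2 ++ [r.2.2]))
      (j, S, A)).2.2.flatten = A.flatten ++ (pvRun (pc * 256) 0 j S).2.2.2 := by
  intro pc
  induction pc with
  | zero => intro j S A; simp [pvRun]
  | succ pc ih =>
    intro j S A
    rw [List.range_succ, List.foldl_append, List.foldl_cons, List.foldl_nil]
    obtain ⟨h1, h2, h3⟩ := ih j S A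
    simp only [h1, h2]
    have hpage := pvPage 256 0 (by norm_num) (pvRun (pc * 256) 0 j S).2.1 (pvRun (pc * 256) 0 j S).2.2.1 []
    simp only [Nat.cast_zero, zero_add] at hpage
    rw [hpage]
    have hadd := pvRun_add (pc * 256) 256 0 j S
    have hfst : (pvRun (pc * 256) 0 j S).1 = 0 := by
      rw [pvRun_fst _ _ _ _ (by norm_num)]; omega
    rw [hfst] at hadd
    rw [show (pc + 1) * 256 = pc * 256 + 256 by ring, hadd]
    refine ⟨rfl, rfl, ?_⟩
    simp only [List.flatten_append, List.flatten_cons, List.flatten_nil, List.append_nil,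
      List.nil_append]
    rw [h3, List.append_assoc]

-- the extended key schedule reads the key modulo its length
theorem pvKsExt_getD (key : String) (hk : key.toList ≠ []) (k : Nat) (hkk : k < 256) :
    ((((List.replicate (256 / (key.toList.map Char.toNat).length + 1) (key.toList.map Char.toNat)).flatten).take 256).getD k 0)
      = (key.toList.getD (k % key.toList.length) ' ').toNat := by
  have hd : 0 < (key.toList.map Char.toNat).length := by
    rw [List.length_map]; exact List.length_pos_iff.mpr hk
  set kb := key.toList.map Char.toNat with hkb
  have h256 : 256 < (256 / kb.length + 1) * kb.length := by
    calc 256 = kb.length * (256 / kb.length) + 256 % kb.length := (Nat.div_add_mod 256 kb.length).symm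
      _ < kb.length * (256 / kb.length) + kb.length := by
          have := Nat.mod_lt 256 hd; omega
      _ = (256 / kb.length + 1) * kb.length := by ring
  have hflatlen : ((List.replicate (256 / kb.length + 1) kb).flatten).length
      = (256 / kb.length + 1) * kb.length := by
    simp [List.length_flatten, List.map_replicate, List.sum_replicate, smul_eq_mul]
  have hgetTake : (((List.replicate (256 / kb.length + 1) kb).flatten).take 256).getD k 0
      = ((List.replicate (256 / kb.length + 1) kb).flatten).getD k 0 := by
    rw [List.getD_eq_getElem _ _ (by simp [hflatlen]; omega),
        List.getD_eq_getElem _ _ (by omega), List.getElem_take]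
  rw [hgetTake, pvFlatRep_getD kb _ k (by omega)]
  have hlen : kb.length = key.toList.length := by simp [hkb]
  rw [hlen]
  exact pvGetD_map_toNat _ _ (Nat.mod_lt _ (by omega))

-- A's KSA equals B's extended-key KSA
theorem pvKSA_eq (key : String) (hk : key.toList ≠ []) :
    prepare_permutation key
      = (((((List.replicate (256 / (key.toList.map Char.toNat).length + 1) (key.toList.map Char.toNat)).flatten).take 256)).foldl
          (fun (st : Nat × Nat × List Nat) k =>
            let j := (st.2.1 + st.2.2.getD st.1 0 + k) % 256
            (st.1 + 1, j, pvSwapB st.2.2 st.1 j))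
          (0, 0, List.range 256)).2.2 := by
  have hd : 0 < (key.toList.map Char.toNat).length := by
    rw [List.length_map]; exact List.length_pos_iff.mpr hk
  set kb := key.toList.map Char.toNat with hkb
  have h256 : 256 < (256 / kb.length + 1) * kb.length := by
    calc 256 = kb.length * (256 / kb.length) + 256 % kb.length := (Nat.div_add_mod 256 kb.length).symm
      _ < kb.length * (256 / kb.length) + kb.length := by
          have := Nat.mod_lt 256 hd; omega
      _ = (256 / kb.length + 1) * kb.length := by ring
  have hflat : ((List.replicate (256 / kb.length + 1) kb).flatten).length
      = (256 / kb.length + 1) * kb.length := by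
    simp [List.length_flatten, List.map_replicate, List.sum_replicate, smul_eq_mul]
  have hlen : ((((List.replicate (256 / kb.length + 1) kb).flatten).take 256)).length = 256 := by
    rw [List.length_take, hflat]; omega
  rw [pvKSA_counter (fun x => (key.toList.getD (x % key.toList.length) ' ').toNat) _ 0 0 (List.range 256)
        (fun k hkk => by
          have h := pvKsExt_getD key hk k (by omega)
          simpa only [Nat.zero_add] using h)]
  unfold prepare_permutation
  simp only
  rw [pvInit_eq, hlen, ← List.range_eq_range']

-- ===== VERDICT (by name: the statement is the Claim_ definition above) =====
theorem arc4_decode_spec : Claim_equal_arc4_decode := by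
  intro key data _ hpre
  unfold Spec_arc4_decode arc4_decode arc4_decode_alt
  dsimp only
  rw [pvKSA_eq key hpre.1, pvLoopA_run]
  obtain ⟨-, -, h3⟩ := pvOuter (((PySem.Str.split₀ data).length + 255) / 256) 0
    ((((List.replicate (256 / (key.toList.map Char.toNat).length + 1) (key.toList.map Char.toNat)).flatten).take 256).foldl
      (fun (st : Nat × Nat × List Nat) k =>
        let j := (st.2.1 + st.2.2.getD st.1 0 + k) % 256
        (st.1 + 1, j, pvSwapB st.2.2 st.1 j))
      (0, 0, List.range 256)).2.2 []
  rw [h3]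
  simp only [List.flatten_nil, List.nil_append]
  rw [pvRun_take _ _ (by omega)]
  rw [← String.toList_inj]
  simp
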